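-- pv_equiv track=rewrite | github.com/Yash-Gavade/LuxNLP | scripts/dataset_creation/conversion/survey_to_conll.py | extract_spans_with_tags
-- ===== SOURCE A (Python) =====
-- from typing import List, Tuple
--
-- def extract_spans_with_tags(
--     text: str, NER_cat: str
-- ) -> Tuple[str, List[Tuple[str, int, int]]]:
--     """
--     Extract <P>...</P>, <E>...</R> and <M>...</M> Spans and returns:
--     - clean_text: Text without Tags
--     - spans: List (span_text, start_char, end_char) refering to clean_text
--     """
--     spans = []
--     out = []
--     i = 0
--     clean_pos = 0
--
--     while i < len(text):
--         # fin next <P>, <E> or <M> tag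
--         start = text.find(f"<{NER_cat[0]}>", i)
--
--         if start == -1:
--             # append rest
--             out.append(text[i:])
--             break
--
--         # Append text befor <Tag>
--         before = text[i:start]
--         out.append(before)
--         clean_pos += len(before)
--
--         # find </P>, </E> or </M>
--         endtag = text.find(f"</{NER_cat[0]}>", start)
--         if endtag == -1:
--             out.append(text[start:])
--             break
--
--         # Content within <P>...</P>
--         inner = text[start + 3 : endtag]
--         inner_clean = inner
--
--         out.append(inner_clean)
--
--         span_start = clean_pos
--         clean_pos += len(inner_clean)
--         span_end = clean_pos
--
--         spans.append((inner_clean, span_start, span_end))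
--
--         i = endtag + 4  # after </P>
--
--     clean_text = "".join(out)
--     return clean_text, spans
-- ===== SOURCE B (Python) =====
-- def extract_spans_with_tags(text, NER_cat):
--     c = NER_cat[0]
--     open_tag, close_tag = "<" + c + ">", "</" + c + ">"
--     # phase 1: cut the text into (gap, inner) pairs plus a trailing remainder
--     pairs = []
--     remaining = text
--     while True:
--         head, sep, rest = remaining.partition(open_tag)
--         if not sep:
--             break
--         inner, sep2, tail = rest.partition(close_tag)
--         if not sep2:
--             break
--         pairs.append((head, inner))
--         remaining = tail
--     # phase 2: assemble clean text and spans from the segment lengths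
--     parts = []
--     spans = []
--     pos = 0
--     for head, inner in pairs:
--         parts.append(head + inner)
--         start = pos + len(head)
--         pos = start + len(inner)
--         spans.append((inner, start, pos))
--     parts.append(remaining)
--     return "".join(parts), spans
-- ===== Notes on version B (the rewrite author's own statement) =====
-- stated objective: alternative
-- what changed: Replaces A's single index-juggling while-loop (absolute find offsets, -1 sentinels, running clean_pos interleaved with output appends) by a two-phase pipeline: phase 1 consumes the string with str.partition into (gap, inner) segment pairs plus a remainder, phase 2 assembles the clean text and computes the span offsets from the segment lengths alone.
-- outside the precondition, e.g. on extract_spans_with_tags('<P>x</P>', ''): A raises IndexError, B raises IndexError; on extract_spans_with_tags('', ''): A returns ('', []), B raises IndexError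
import Mathlib
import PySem

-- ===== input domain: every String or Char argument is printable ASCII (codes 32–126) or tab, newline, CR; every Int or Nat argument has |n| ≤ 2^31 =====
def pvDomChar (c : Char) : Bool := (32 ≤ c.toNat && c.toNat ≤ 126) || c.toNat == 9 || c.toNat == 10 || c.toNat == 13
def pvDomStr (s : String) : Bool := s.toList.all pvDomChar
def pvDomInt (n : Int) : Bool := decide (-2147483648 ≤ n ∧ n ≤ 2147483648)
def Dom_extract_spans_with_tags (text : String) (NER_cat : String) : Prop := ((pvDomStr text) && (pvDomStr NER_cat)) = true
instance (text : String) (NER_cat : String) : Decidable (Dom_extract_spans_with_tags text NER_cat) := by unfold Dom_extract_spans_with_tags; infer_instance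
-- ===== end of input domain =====

-- B replaces A's index-juggling find-loop with a two-phase partition pipeline (cut into
-- segment pairs, then assemble clean text and span offsets from segment lengths); same cost.


-- ===== PORT A =====
-- A's while-loop, with fuel (i strictly increases each iteration, so fuel = |text|+1 suffices;
-- the fuel guard only makes the same computation total).
def pvLoopA (t openT closeT : List Char) (fuel : Nat) (i cleanPos : Int)
    (out : List (List Char)) (spans : List (String × Int × Int)) :
    List (List Char) × List (String × Int × Int) :=
  match fuel with
  | 0 => (out, spans)
  | fuel + 1 =>
    if i < (t.length : Int) then
      let start := PySem.Chars.findFrom t openT i none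
      if start = -1 then
        (out ++ [PySem.List.slice t (some i) none], spans)
      else
        let before := PySem.List.slice t (some i) (some start)
        let out := out ++ [before]
        let cleanPos := cleanPos + before.length
        let endtag := PySem.Chars.findFrom t closeT start none
        if endtag = -1 then
          (out ++ [PySem.List.slice t (some start) none], spans)
        else
          let inner := PySem.List.slice t (some (start + 3)) (some endtag)
          let out := out ++ [inner]
          let spanStart := cleanPos
          let cleanPos := cleanPos + inner.length
          pvLoopA t openT closeT fuel (endtag + 4) cleanPos out
            (spans ++ [(String.ofList inner, spanStart, cleanPos)])
    else (out, spans)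

def extract_spans_with_tags (text : String) (NER_cat : String) : String × (List (String × Int × Int)) :=
  match PySem.Str.pyGet? NER_cat 0 with
  | none => ("", [])   -- NER_cat = "": Python raises IndexError; excluded by Pre_
  | some c =>
    let t := text.toList
    let r := pvLoopA t ['<', c, '>'] ['<', '/', c, '>'] (t.length + 1) 0 0 [] []
    (String.ofList (PySem.Chars.join [] r.1), r.2)

-- ===== PORT B =====
-- str.partition(sep), ported by hand via Chars.find (exact: first occurrence, or (s, '', '')).
def pvPartition (s sep : List Char) : List Char × Bool × List Char :=
  let j := PySem.Chars.find s sep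
  if j = -1 then (s, false, [])
  else (s.take j.toNat, true, s.drop (j.toNat + sep.length))

-- phase 1 of Source B: the while-True cutting loop (fuel guard only; remainder shrinks each round)
def pvCut (openT closeT : List Char) (fuel : Nat) (remaining : List Char) :
    List (List Char × List Char) × List Char :=
  match fuel with
  | 0 => ([], remaining)
  | fuel + 1 =>
    let p1 := pvPartition remaining openT
    if p1.2.1 = false then ([], remaining)
    else
      let p2 := pvPartition p1.2.2 closeT
      if p2.2.1 = false then ([], remaining)
      else
        let r := pvCut openT closeT fuel p2.2.2
        ((p1.1, p2.1) :: r.1, r.2)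

def extract_spans_with_tags_alt (text : String) (NER_cat : String) : String × (List (String × Int × Int)) :=
  match PySem.Str.pyGet? NER_cat 0 with
  | none => ("", [])   -- NER_cat = "": Python raises IndexError; excluded by Pre_
  | some c =>
    let t := text.toList
    let cut := pvCut ['<', c, '>'] ['<', '/', c, '>'] (t.length + 1) t
    -- phase 2 of Source B: assemble clean text and spans from segment lengths
    let r := cut.1.foldl
      (fun (acc : List (List Char) × List (String × Int × Int) × Int) p =>
        let start := acc.2.2 + (p.1.length : Int)
        let pos := start + (p.2.length : Int)
        (acc.1 ++ [p.1 ++ p.2], acc.2.1 ++ [(String.ofList p.2, start, pos)], pos))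
      ([], [], 0)
    (String.ofList (PySem.Chars.join [] (r.1 ++ [cut.2])), r.2.1)

-- ===== PRECONDITION & SPEC =====
-- Pre_ excludes only NER_cat = "": there A raises IndexError from NER_cat[0] whenever text is
-- nonempty, and on ('', '') it returns ('', []) only because the loop body never runs, while B
-- evaluates NER_cat[0] up front and itself raises IndexError on every such input.
def Pre_extract_spans_with_tags (text : String) (NER_cat : String) : Prop := NER_cat ≠ ""
instance (text : String) (NER_cat : String) : Decidable (Pre_extract_spans_with_tags text NER_cat) := by unfold Pre_extract_spans_with_tags; infer_instance
def pvWitness_extract_spans_with_tags : String × String := ("a<P>bc</P>d<P>e</P>", "PER")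

def Spec_extract_spans_with_tags (text : String) (NER_cat : String) (out : String × (List (String × Int × Int))) : Prop := out = extract_spans_with_tags_alt text NER_cat
instance (text : String) (NER_cat : String) (out : String × (List (String × Int × Int))) : Decidable (Spec_extract_spans_with_tags text NER_cat out) := by unfold Spec_extract_spans_with_tags; infer_instance

-- ===== CLAIM (what is proved, stated in full; the proofs are below) =====
def Claim_equal_extract_spans_with_tags : Prop := ∀ (text : String) (NER_cat : String), Dom_extract_spans_with_tags text NER_cat → Pre_extract_spans_with_tags text NER_cat → Spec_extract_spans_with_tags text NER_cat (extract_spans_with_tags text NER_cat)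


-- ===== LEMMAS AND PROOFS =====

-- the reference spans computation: offsets accumulated forward over the cut pairs
def pvSpansOf (pos : Int) : List (List Char × List Char) → List (String × Int × Int)
  | [] => []
  | (h, i) :: ps =>
      (String.ofList i, pos + (h.length : Int), pos + (h.length : Int) + (i.length : Int)) ::
        pvSpansOf (pos + (h.length : Int) + (i.length : Int)) ps

-- find points at the position iff it is an occurrence with none strictly before it
theorem pvFind_eq_of (s sub : List Char) (k : Nat)
    (hpre : sub <+: s.drop k) (hmin : ∀ i < k, ¬ sub <+: s.drop i) :
    PySem.Chars.find s sub = (k : Int) := by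
  have hinf : sub <:+: s := ((hpre.isInfix).trans (s.drop_suffix k).isInfix)
  have h0 : 0 ≤ PySem.Chars.find s sub := (PySem.Chars.find_nonneg_iff s sub).2 hinf
  obtain ⟨h1, h2⟩ := PySem.Chars.find_spec h0
  rcases lt_trichotomy (PySem.Chars.find s sub).toNat k with h | h | h
  · exact absurd h1 (hmin _ h)
  · omega
  · exact absurd hpre (h2 _ h)

-- when no occurrence starts before position k, find restarts at the suffix
theorem pvFind_shift (s sub : List Char) (k : Nat) (hmin : ∀ i < k, ¬ sub <+: s.drop i) :
    PySem.Chars.find s sub =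
      if PySem.Chars.find (s.drop k) sub = -1 then -1
      else (k : Int) + PySem.Chars.find (s.drop k) sub := by
  split
  case isTrue h =>
    rw [PySem.Chars.find_eq_neg_one_iff] at h ⊢
    intro hinf
    have h0 : 0 ≤ PySem.Chars.find s sub := (PySem.Chars.find_nonneg_iff s sub).2 hinf
    obtain ⟨h1, h2⟩ := PySem.Chars.find_spec h0
    set f := (PySem.Chars.find s sub).toNat with hf
    have hfk : k ≤ f := by
      by_contra hlt
      exact hmin f (by omega) h1
    apply h
    have hp : sub <+: (s.drop k).drop (f - k) := by
      rw [List.drop_drop]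
      have : k + (f - k) = f := by omega
      rw [this]; exact h1
    exact (hp.isInfix).trans ((s.drop k).drop_suffix (f - k)).isInfix
  case isFalse h =>
    have h0 : 0 ≤ PySem.Chars.find (s.drop k) sub := by
      have := PySem.Chars.neg_one_le_find (s.drop k) sub; omega
    obtain ⟨h1, h2⟩ := PySem.Chars.find_spec h0
    rw [List.drop_drop] at h1
    have := pvFind_eq_of s sub (k + (PySem.Chars.find (s.drop k) sub).toNat) h1
      (by intro i hi
          by_cases hik : i < k
          · exact hmin i hik
          · have hlt : i - k < (PySem.Chars.find (s.drop k) sub).toNat := by omega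
            have h3 := h2 _ hlt
            rw [List.drop_drop] at h3
            have hik' : k + (i - k) = i := by omega
            rw [hik'] at h3; exact h3)
    omega

-- tag-shape fact: the close tag cannot start inside the open tag
theorem pvFind_close_shift (c : Char) (rest : List Char) :
    PySem.Chars.find (['<', c, '>'] ++ rest) ['<', '/', c, '>'] =
      if PySem.Chars.find rest ['<', '/', c, '>'] = -1 then -1
      else 3 + PySem.Chars.find rest ['<', '/', c, '>'] := by
  have h := pvFind_shift (['<', c, '>'] ++ rest) ['<', '/', c, '>'] 3
    (by intro i hi
        interval_cases i <;> simp [List.cons_prefix_cons] <;> intros <;> simp_all)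
  simpa using h

-- "".join(l) is flatten
theorem pvJoin_nil_flatten (l : List (List Char)) : PySem.Chars.join [] l = l.flatten := by
  induction l with
  | nil => rfl
  | cons a t ih =>
    cases t with
    | nil => simp [PySem.Chars.join, List.intercalate]
    | cons b t2 => rw [PySem.Chars.join_cons_cons]; simp_all

-- B's phase-2 foldl, characterised
theorem pvFoldB_eq (pairs : List (List Char × List Char))
    (P : List (List Char)) (S : List (String × Int × Int)) (pos : Int) :
    pairs.foldl
      (fun (acc : List (List Char) × List (String × Int × Int) × Int) p =>
        let start := acc.2.2 + (p.1.length : Int)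
        let pos := start + (p.2.length : Int)
        (acc.1 ++ [p.1 ++ p.2], acc.2.1 ++ [(String.ofList p.2, start, pos)], pos))
      (P, S, pos) =
    (P ++ pairs.map (fun p => p.1 ++ p.2), S ++ pvSpansOf pos pairs,
     pos + ((pairs.map (fun p => (p.1.length : Int) + p.2.length)).sum)) := by
  induction pairs generalizing P S pos with
  | nil => simp [pvSpansOf]
  | cons p ps ih =>
    simp only [List.foldl_cons, List.map_cons, List.sum_cons]
    rw [ih]
    obtain ⟨h, i⟩ := p
    simp only [pvSpansOf, List.append_assoc, List.singleton_append, Prod.mk.injEq]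
    refine ⟨trivial, trivial, by ring⟩

-- a successful partition strictly shrinks the string (nonempty separator)
theorem pvPartition_found_lt (s sep : List Char) (hs : sep ≠ [])
    (h : (pvPartition s sep).2.1 = true) :
    (pvPartition s sep).2.2.length < s.length := by
  have h0 : 0 ≤ PySem.Chars.find s sep := by
    unfold pvPartition at h
    by_cases hf : PySem.Chars.find s sep = -1
    · simp [hf] at h
    · have := PySem.Chars.neg_one_le_find s sep; omega
  obtain ⟨h1, _⟩ := PySem.Chars.find_spec h0
  have hlen := h1.length_le
  unfold pvPartition
  rw [if_neg (by omega)]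
  simp at hlen ⊢
  have : 1 ≤ sep.length := by cases sep <;> simp_all
  omega

-- fuel irrelevance for pvCut (tags nonempty ⇒ the remainder shrinks every round)
theorem pvCut_fuel (openT closeT : List Char) (ho : openT ≠ []) (hc : closeT ≠ [])
    (f1 f2 : Nat) (s : List Char) (h1 : s.length < f1) (h2 : s.length < f2) :
    pvCut openT closeT f1 s = pvCut openT closeT f2 s := by
  induction f1 generalizing f2 s with
  | zero => omega
  | succ f1 ih =>
    cases f2 with
    | zero => omega
    | succ f2 =>
      simp only [pvCut]
      by_cases hp1 : (pvPartition s openT).2.1 = false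
      · simp [hp1]
      · simp only [hp1]
        by_cases hp2 : (pvPartition (pvPartition s openT).2.2 closeT).2.1 = false
        · simp [hp2]
        · have hl1 : (pvPartition s openT).2.2.length < s.length :=
            pvPartition_found_lt s openT ho (by simpa using hp1)
          have hl2 : (pvPartition (pvPartition s openT).2.2 closeT).2.2.length <
              (pvPartition s openT).2.2.length :=
            pvPartition_found_lt _ closeT hc (by simpa using hp2)
          rw [ih f2 _ (by omega) (by omega)]

-- one successful round of pvCut, unfolded
theorem pvCut_cons (openT closeT : List Char) (fl : Nat) (s : List Char)
    (h1 : (pvPartition s openT).2.1 = true)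
    (h2 : (pvPartition (pvPartition s openT).2.2 closeT).2.1 = true) :
    pvCut openT closeT (fl + 1) s =
      (((pvPartition s openT).1, (pvPartition (pvPartition s openT).2.2 closeT).1) ::
         (pvCut openT closeT fl (pvPartition (pvPartition s openT).2.2 closeT).2.2).1,
       (pvCut openT closeT fl (pvPartition (pvPartition s openT).2.2 closeT).2.2).2) := by
  simp only [pvCut, h1, h2]
  simp

-- the main induction: A's loop state equals the cut/assemble decomposition of the suffix
theorem pvLoopA_eq (c : Char) (fuel : Nat) :
    ∀ (t : List Char) (i : Nat) (cp : Int) (out : List (List Char)) (spans : List (String × Int × Int)),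
      i ≤ t.length → t.length - i < fuel →
      (pvLoopA t ['<', c, '>'] ['<', '/', c, '>'] fuel (i : Int) cp out spans).1.flatten =
          out.flatten ++ (((pvCut ['<', c, '>'] ['<', '/', c, '>'] ((t.drop i).length + 1) (t.drop i)).1.map
            (fun p => p.1 ++ p.2)).flatten ++
            (pvCut ['<', c, '>'] ['<', '/', c, '>'] ((t.drop i).length + 1) (t.drop i)).2) ∧
        (pvLoopA t ['<', c, '>'] ['<', '/', c, '>'] fuel (i : Int) cp out spans).2 =
          spans ++ pvSpansOf cp (pvCut ['<', c, '>'] ['<', '/', c, '>'] ((t.drop i).length + 1) (t.drop i)).1 := by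
  induction fuel with
  | zero => intro t i cp out spans h1 h2; omega
  | succ f ih =>
    intro t i cp out spans hile hfuel
    by_cases hlt : i < t.length
    case neg =>
      have hdrop : t.drop i = [] := by
        apply List.drop_eq_nil_of_le; omega
      rw [hdrop]
      simp only [pvLoopA]
      rw [if_neg (by exact_mod_cast by omega)]
      simp [pvCut, pvPartition, PySem.Chars.find_eq_neg_one_iff, pvSpansOf]
    case pos =>
      have hslen : (t.drop i).length = t.length - i := by simp
      simp only [pvLoopA]
      rw [if_pos (by exact_mod_cast hlt)]
      rw [PySem.Chars.findFrom_natCast t ['<', c, '>'] i hile]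
      by_cases hA : PySem.Chars.find (t.drop i) ['<', c, '>'] = -1
      · rw [if_pos hA]
        rw [PySem.List.slice_from_natCast]
        have hp1 : pvPartition (t.drop i) ['<', c, '>'] = (t.drop i, false, []) := by
          unfold pvPartition; rw [if_pos hA]
        simp only [pvCut, hp1]
        simp [pvSpansOf]
      · -- open tag found at j
        rw [if_neg hA]
        have h0j : 0 ≤ PySem.Chars.find (t.drop i) ['<', c, '>'] := by
          have := PySem.Chars.neg_one_le_find (t.drop i) ['<', c, '>']; omega
        set j := PySem.Chars.find (t.drop i) ['<', c, '>'] with hjdef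
        have hpre := (PySem.Chars.find_spec h0j).1
        have hjlen : j.toNat + 3 ≤ (t.drop i).length := by
          have := hpre.length_le; simp at this; omega
        have hp1 : pvPartition (t.drop i) ['<', c, '>'] =
            ((t.drop i).take j.toNat, true, (t.drop i).drop (j.toNat + 3)) := by
          unfold pvPartition; rw [← hjdef, if_neg hA]; norm_num
        have hcastj : (i : Int) + j = ((i + j.toNat : Nat) : Int) := by push_cast; omega
        rw [if_neg (by omega)]
        rw [hcastj, PySem.List.slice_natCast]
        have htake : i + j.toNat - i = j.toNat := by omega
        rw [htake]
        have hbl : ((t.drop i).take j.toNat).length = j.toNat := by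
          simp; omega
        rw [PySem.Chars.findFrom_natCast t ['<', '/', c, '>'] (i + j.toNat) (by omega)]
        have hdd : t.drop (i + j.toNat) = (t.drop i).drop j.toNat := by
          rw [List.drop_drop]
        obtain ⟨u, hu⟩ := hpre
        have hrest : (t.drop i).drop (j.toNat + 3) = u := by
          have h3 : ((t.drop i).drop j.toNat).drop 3 = u := by
            rw [← hu]; simp
          rw [← h3, List.drop_drop, List.drop_drop, List.drop_drop]
        have hsplit : (t.drop i).drop j.toNat = ['<', c, '>'] ++ ((t.drop i).drop (j.toNat + 3)) := by
          rw [hrest, hu]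
        rw [hdd, hsplit, pvFind_close_shift c]
        by_cases hB : PySem.Chars.find ((t.drop i).drop (j.toNat + 3)) ['<', '/', c, '>'] = -1
        · rw [if_pos hB]
          rw [PySem.List.slice_from_natCast]
          have hp2 : pvPartition ((t.drop i).drop (j.toNat + 3)) ['<', '/', c, '>'] =
              ((t.drop i).drop (j.toNat + 3), false, []) := by
            unfold pvPartition; rw [if_pos hB]
          simp only [pvCut, hp1, hp2]
          simp [pvSpansOf, hdd, hsplit]
          conv_rhs => rw [← List.take_append_drop j.toNat (t.drop i), hsplit]
          simp [List.drop_drop]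
        · -- close tag found
          simp only [if_neg hB]
          have h0k : 0 ≤ PySem.Chars.find ((t.drop i).drop (j.toNat + 3)) ['<', '/', c, '>'] := by
            have := PySem.Chars.neg_one_le_find ((t.drop i).drop (j.toNat + 3)) ['<', '/', c, '>']; omega
          set k := PySem.Chars.find ((t.drop i).drop (j.toNat + 3)) ['<', '/', c, '>'] with hkdef
          have hkpre := (PySem.Chars.find_spec h0k).1
          have hklen : k.toNat + 4 + (j.toNat + 3) + i ≤ t.length := by
            have hle := hkpre.length_le
            simp only [List.length_drop] at hle
            have h4 : (['<', '/', c, '>'] : List Char).length = 4 := rfl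
            rw [h4] at hle
            omega
          have hp2 : pvPartition ((t.drop i).drop (j.toNat + 3)) ['<', '/', c, '>'] =
              (((t.drop i).drop (j.toNat + 3)).take k.toNat, true,
               ((t.drop i).drop (j.toNat + 3)).drop (k.toNat + 4)) := by
            unfold pvPartition; rw [← hkdef, if_neg hB]; norm_num
          have hcaste : ((i + j.toNat : Nat) : Int) + (3 + k) = ((i + j.toNat + 3 + k.toNat : Nat) : Int) := by
            push_cast; omega
          simp only [if_neg (show ¬((3:Int) + k = -1) by omega)]
          simp only [hcaste]
          simp only [if_neg (show ¬((i + j.toNat + 3 + k.toNat : Nat) : Int) = -1 by omega)]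
          have hcasts : ((i + j.toNat : Nat) : Int) + 3 = ((i + j.toNat + 3 : Nat) : Int) := by push_cast; ring
          simp only [hcasts, PySem.List.slice_natCast]
          have htke : i + j.toNat + 3 + k.toNat - (i + j.toNat + 3) = k.toNat := by omega
          simp only [htke]
          have hdd3 : t.drop (i + j.toNat + 3) = (t.drop i).drop (j.toNat + 3) := by
            have hnn : i + j.toNat + 3 = i + (j.toNat + 3) := by omega
            rw [hnn, List.drop_drop]
          simp only [hdd3]
          have hil : (((t.drop i).drop (j.toNat + 3)).take k.toNat).length = k.toNat := by
            simp only [List.length_take, List.length_drop]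
            omega
          have hcast4 : ((i + j.toNat + 3 + k.toNat : Nat) : Int) + 4 = ((i + j.toNat + 3 + k.toNat + 4 : Nat) : Int) := by
            push_cast; ring
          simp only [hcast4]
          have hi'le : i + j.toNat + 3 + k.toNat + 4 ≤ t.length := by omega
          obtain ⟨ihf, ihs⟩ := ih t (i + j.toNat + 3 + k.toNat + 4)
            (cp + ↑(((t.drop i).take j.toNat).length) + ↑((((t.drop i).drop (j.toNat + 3)).take k.toNat).length))
            (out ++ [(t.drop i).take j.toNat] ++ [((t.drop i).drop (j.toNat + 3)).take k.toNat])
            (spans ++ [(String.ofList (((t.drop i).drop (j.toNat + 3)).take k.toNat),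
              cp + ↑(((t.drop i).take j.toNat).length),
              cp + ↑(((t.drop i).take j.toNat).length) + ↑((((t.drop i).drop (j.toNat + 3)).take k.toNat).length))])
            hi'le (by omega)
          have htail : t.drop (i + j.toNat + 3 + k.toNat + 4) = ((t.drop i).drop (j.toNat + 3)).drop (k.toNat + 4) := by
            rw [List.drop_drop, List.drop_drop]
            congr 1
            omega
          have hfa : (((t.drop i).drop (j.toNat + 3)).drop (k.toNat + 4)).length < (t.drop i).length := by
            simp only [List.length_drop]; omega
          have hcut : pvCut ['<', c, '>'] ['<', '/', c, '>'] ((t.drop i).length + 1) (t.drop i) =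
              (((t.drop i).take j.toNat, ((t.drop i).drop (j.toNat + 3)).take k.toNat) ::
                (pvCut ['<', c, '>'] ['<', '/', c, '>']
                  ((((t.drop i).drop (j.toNat + 3)).drop (k.toNat + 4)).length + 1)
                  (((t.drop i).drop (j.toNat + 3)).drop (k.toNat + 4))).1,
               (pvCut ['<', c, '>'] ['<', '/', c, '>']
                  ((((t.drop i).drop (j.toNat + 3)).drop (k.toNat + 4)).length + 1)
                  (((t.drop i).drop (j.toNat + 3)).drop (k.toNat + 4))).2) := by
            rw [pvCut_cons _ _ _ _ (by simp only [hp1]) (by simp only [hp1, hp2])]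
            simp only [hp1, hp2]
            rw [pvCut_fuel ['<', c, '>'] ['<', '/', c, '>'] (by simp) (by simp)
              ((t.drop i).length) ((((t.drop i).drop (j.toNat + 3)).drop (k.toNat + 4)).length + 1)
              (((t.drop i).drop (j.toNat + 3)).drop (k.toNat + 4)) hfa (Nat.lt_succ_self _)]
          rw [hcut]
          refine ⟨?_, ?_⟩
          · rw [ihf, htail]
            simp
          · rw [ihs, htail]
            simp only [pvSpansOf, hbl, hil]
            simp

-- ===== VERDICT (by name: the statement is the Claim_ definition above) =====
theorem extract_spans_with_tags_spec : Claim_equal_extract_spans_with_tags := by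
  intro text NER_cat hdom hpre
  unfold Spec_extract_spans_with_tags
  unfold extract_spans_with_tags extract_spans_with_tags_alt
  have hNE : NER_cat.toList ≠ [] := by
    intro hnil
    exact hpre (by rwa [← String.toList_eq_nil_iff])
  obtain ⟨c, cs, hc⟩ : ∃ c cs, NER_cat.toList = c :: cs := by
    cases h : NER_cat.toList with
    | nil => exact absurd h hNE
    | cons c cs => exact ⟨c, cs, rfl⟩
  have hget : PySem.Str.pyGet? NER_cat 0 = some c := by
    simp [hc]
  rw [hget]
  dsimp only
  obtain ⟨hf, hs⟩ := pvLoopA_eq c (text.toList.length + 1) text.toList 0 0 [] []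
    (by omega) (by omega)
  simp only [List.drop_zero, Nat.cast_zero, List.flatten_nil,
    List.nil_append] at hf hs
  rw [pvFoldB_eq]
  simp only []
  rw [Prod.ext_iff]
  constructor
  · simp only [pvJoin_nil_flatten]
    rw [hf]
    simp
  · rw [hs]
    simp
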